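-- pv_equiv track=rewrite | github.com/anoboa2/vestaboard | vestaboard/_style.py | pad_row
-- ===== SOURCE A (Python) =====
-- def pad_row(row: list, maxColumns: int, align = "center"):
--   """
--   Interprets how many blank spaces are needed from an array of characters codes
--   and adds enough padding to center the text on the board
--   Params:
--     row: the row to be padded
--     maxColumns: the maximum number of columns on the Vestaboard
--     align: the alignment of the text on the board
--   """
--   while len(row) < maxColumns:
--     if align == "right":
--       row.insert(0, 0)
--     elif align == "center":
--       if len(row) % 2 == 1:
--         row.append(0)
--       else:
--         row.insert(0, 0)
--     elif align == "left":
--       row.append(0)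
--     else:
--       "no alignment specified"
--
--   return row
-- ===== SOURCE B (Python) =====
-- def pad_row(row: list, maxColumns: int, align = "center"):
--   pad = maxColumns - len(row)
--   if pad <= 0:
--     return row
--   n = len(row)
--   if align == "left":
--     front = 0
--   elif align == "right":
--     front = pad
--   elif align == "center":
--     front = (pad + (1 if n % 2 == 0 else 0)) // 2
--   else:
--     return row  # A never returns here (it loops forever); excluded by Pre_
--   row[:0] = [0] * front
--   row.extend([0] * (pad - front))
--   return row
-- ===== Notes on version B (the rewrite author's own statement) =====
-- stated objective: simpler
-- what changed: Replaces the one-cell-at-a-time while loop with a closed-form computation of the front/back pad widths (center's alternation collapses to a parity formula) followed by a single in-place splice and extend.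
-- outside the precondition, e.g. on pad_row([1], 3, 'justify'): A does not finish within the time limit, B returns [1]
import Mathlib
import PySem

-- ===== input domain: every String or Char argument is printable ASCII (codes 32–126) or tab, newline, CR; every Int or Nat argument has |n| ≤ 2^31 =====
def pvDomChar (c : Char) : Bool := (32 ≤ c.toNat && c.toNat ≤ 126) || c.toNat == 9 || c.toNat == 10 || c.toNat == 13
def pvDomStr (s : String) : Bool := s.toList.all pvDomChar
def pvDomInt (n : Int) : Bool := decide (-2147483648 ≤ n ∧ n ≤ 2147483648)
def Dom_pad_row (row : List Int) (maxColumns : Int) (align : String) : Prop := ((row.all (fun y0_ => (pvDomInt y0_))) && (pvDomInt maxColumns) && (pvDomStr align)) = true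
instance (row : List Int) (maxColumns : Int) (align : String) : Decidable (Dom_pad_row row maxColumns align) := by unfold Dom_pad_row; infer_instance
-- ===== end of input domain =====

-- B replaces A's one-cell-at-a-time while loop by a closed-form computation of the
-- front/back pad widths followed by a single splice; equivalence is about the return
-- value (both Pythons also mutate `row` in place identically on the Pre_ inputs).

-- ===== PORT A =====
-- Literal port of A's while loop; on an unrecognized align with len(row) < maxColumns
-- the Python loop never terminates (excluded by Pre_), so the port exits there.
def pad_row (row : List Int) (maxColumns : Int) (align : String) : List Int :=
  if _h : (row.length : Int) < maxColumns then
    if align == "right" then pad_row (0 :: row) maxColumns align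
    else if align == "center" then
      if (row.length : Int) % 2 == 1 then pad_row (row ++ [0]) maxColumns align
      else pad_row (0 :: row) maxColumns align
    else if align == "left" then pad_row (row ++ [0]) maxColumns align
    else row   -- Python diverges here; outside Pre_
  else row
termination_by (maxColumns - row.length).toNat
decreasing_by all_goals (simp_all; omega)

-- ===== PORT B =====
def pad_row_alt (row : List Int) (maxColumns : Int) (align : String) : List Int :=
  let pad : Int := maxColumns - row.length
  if pad ≤ 0 then row
  else
    let n : Int := row.length
    let front? : Option Int :=
      if align == "left" then some 0
      else if align == "right" then some pad
      else if align == "center" then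
        some (PySem.Int.floordiv (pad + (if n % 2 == 0 then 1 else 0)) 2)
      else none   -- Python B returns row here (where A diverges; outside Pre_)
    match front? with
    | none => row
    | some front =>
        List.replicate front.toNat 0 ++ row ++ List.replicate (pad - front).toNat 0

-- ===== PRECONDITION & SPEC =====
-- Pre_ excludes only the inputs on which A never returns at all (an unrecognized
-- alignment while the row is still shorter than maxColumns: A's while loop spins forever).
def Pre_pad_row (row : List Int) (maxColumns : Int) (align : String) : Prop :=
  align = "left" ∨ align = "right" ∨ align = "center" ∨ maxColumns ≤ (row.length : Int)
instance (row : List Int) (maxColumns : Int) (align : String) : Decidable (Pre_pad_row row maxColumns align) := by unfold Pre_pad_row; infer_instance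
def pvWitness_pad_row : List Int × Int × String := ([5, 7], 6, "center")
def Spec_pad_row (row : List Int) (maxColumns : Int) (align : String) (out : List Int) : Prop := out = pad_row_alt row maxColumns align
instance (row : List Int) (maxColumns : Int) (align : String) (out : List Int) : Decidable (Spec_pad_row row maxColumns align out) := by unfold Spec_pad_row; infer_instance

-- ===== CLAIM (what is proved, stated in full; the proofs are below) =====
def Claim_equal_pad_row : Prop := ∀ (row : List Int) (maxColumns : Int) (align : String), Dom_pad_row row maxColumns align → Pre_pad_row row maxColumns align → Spec_pad_row row maxColumns align (pad_row row maxColumns align)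

-- ===== LEMMAS AND PROOFS =====

theorem alt_center_val (row : List Int) (m : Int) (h : (row.length : Int) < m) :
    pad_row_alt row m "center"
      = List.replicate (PySem.Int.floordiv (m - row.length + (if (row.length : Int) % 2 = 0 then 1 else 0)) 2).toNat 0
        ++ row
        ++ List.replicate (m - row.length - PySem.Int.floordiv (m - row.length + (if (row.length : Int) % 2 = 0 then 1 else 0)) 2).toNat 0 := by
  unfold pad_row_alt
  rw [if_neg (by omega : ¬ (m - (row.length : Int) ≤ 0))]
  have e1 : (("center" : String) == "left") = false := rfl
  have e2 : (("center" : String) == "right") = false := rfl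
  have e3 : (("center" : String) == "center") = true := rfl
  simp only [e1, e2, e3, Bool.false_eq_true, if_false, if_true]
  by_cases hp : (row.length : Int) % 2 = 0
  · simp [hp]
  · simp [hp]

theorem alt_left_val (row : List Int) (m : Int) (h : (row.length : Int) < m) :
    pad_row_alt row m "left" = row ++ List.replicate (m - row.length).toNat 0 := by
  unfold pad_row_alt
  rw [if_neg (by omega : ¬ (m - (row.length : Int) ≤ 0))]
  simp

theorem alt_right_val (row : List Int) (m : Int) (h : (row.length : Int) < m) :
    pad_row_alt row m "right" = List.replicate (m - row.length).toNat 0 ++ row := by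
  unfold pad_row_alt
  rw [if_neg (by omega : ¬ (m - (row.length : Int) ≤ 0))]
  have e1 : (("right" : String) == "left") = false := rfl
  simp only [e1, Bool.false_eq_true, if_false, beq_self_eq_true, if_true]
  simp

theorem alt_done (row : List Int) (m : Int) (align : String) (_h : m ≤ (row.length : Int)) :
    pad_row_alt row m align = row := by
  unfold pad_row_alt
  rw [if_pos (by omega : (m - (row.length : Int) ≤ 0))]


theorem fd_eq (a : Int) (h : 0 < a) : PySem.Int.floordiv a 2 = a / 2 :=
  PySem.Int.floordiv_eq_ediv_of_pos (by omega)

theorem alt_left_step (row : List Int) (m : Int) (h : (row.length : Int) < m) :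
    pad_row_alt (row ++ [0]) m "left" = pad_row_alt row m "left" := by
  rw [alt_left_val row m h]
  by_cases h2 : (row.length : Int) + 1 < m
  · rw [alt_left_val _ m (by simpa using h2)]
    simp only [List.length_append, List.length_cons, List.length_nil, List.append_assoc,
      List.singleton_append, ← List.replicate_succ]
    congr 2
    push_cast
    omega
  · rw [alt_done _ m _ (by simp; omega)]
    rw [show (m - (row.length : Int)).toNat = 1 by omega]
    simp

theorem alt_right_step (row : List Int) (m : Int) (h : (row.length : Int) < m) :
    pad_row_alt (0 :: row) m "right" = pad_row_alt row m "right" := by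
  rw [alt_right_val row m h]
  by_cases h2 : (row.length : Int) + 1 < m
  · rw [alt_right_val _ m (by simpa using h2)]
    simp only [List.length_cons]
    rw [show (m - (row.length : Int)).toNat = (m - ((row.length + 1 : Nat) : Int)).toNat + 1 by push_cast; omega]
    simp [List.replicate_succ']
  · rw [alt_done _ m _ (by simp; omega)]
    rw [show (m - (row.length : Int)).toNat = 1 by omega]
    simp

theorem alt_center_append (row : List Int) (m : Int)
    (h : (row.length : Int) < m) (hp : (row.length : Int) % 2 = 1) :
    pad_row_alt (row ++ [0]) m "center" = pad_row_alt row m "center" := by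
  rw [alt_center_val row m h, if_neg (by omega)]
  by_cases h2 : (row.length : Int) + 1 < m
  · rw [alt_center_val _ m (by simpa using h2)]
    simp only [List.length_append, List.length_cons, List.length_nil]
    rw [if_pos (by push_cast; omega)]
    rw [show ((row.length + 1 : Nat) : Int) = (row.length : Int) + 1 by push_cast; ring]
    rw [show m - ((row.length : Int) + 1) + 1 = m - (row.length : Int) + 0 by ring]
    set f := PySem.Int.floordiv (m - (row.length : Int) + 0) 2 with hf
    have hb : 0 ≤ f ∧ f ≤ m - (row.length : Int) - 1 := by
      rw [hf, fd_eq _ (by omega)]; omega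
    clear_value f
    simp only [List.append_assoc, List.singleton_append, ← List.replicate_succ]
    congr 3
    omega
  · rw [alt_done _ m _ (by simp; omega)]
    rw [show m - (row.length : Int) + 0 = 1 by omega]
    rw [show PySem.Int.floordiv 1 2 = 0 by rw [fd_eq _ (by omega)]; decide]
    rw [show (m - (row.length : Int) - 0).toNat = 1 by omega]
    simp

theorem alt_center_prepend (row : List Int) (m : Int)
    (h : (row.length : Int) < m) (hp : (row.length : Int) % 2 = 0) :
    pad_row_alt (0 :: row) m "center" = pad_row_alt row m "center" := by
  rw [alt_center_val row m h, if_pos hp]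
  by_cases h2 : (row.length : Int) + 1 < m
  · rw [alt_center_val _ m (by simpa using h2)]
    simp only [List.length_cons]
    rw [if_neg (by push_cast; omega)]
    rw [show ((row.length + 1 : Nat) : Int) = (row.length : Int) + 1 by push_cast; ring]
    rw [show m - ((row.length : Int) + 1) + 0 = m - (row.length : Int) - 1 by ring]
    set f := PySem.Int.floordiv (m - (row.length : Int) - 1) 2 with hf
    have hb : 0 ≤ f ∧ f ≤ m - (row.length : Int) - 1 := by
      rw [hf, fd_eq _ (by omega)]; omega
    have hF : PySem.Int.floordiv (m - (row.length : Int) + 1) 2 = f + 1 := by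
      rw [fd_eq _ (by omega), hf, fd_eq _ (by omega)]; omega
    clear_value f
    rw [hF]
    rw [show (f + 1).toNat = f.toNat + 1 by omega]
    rw [show (m - (row.length : Int) - (f + 1)).toNat = (m - ((row.length : Int)) - 1 - f).toNat by omega]
    simp [List.replicate_succ', List.append_assoc]
    omega
  · rw [alt_done _ m _ (by simp; omega)]
    rw [show m - (row.length : Int) + 1 = 2 by omega]
    rw [show PySem.Int.floordiv 2 2 = 1 by rw [fd_eq _ (by omega)]; decide]
    rw [show m - (row.length : Int) - 1 = 0 by omega]
    simp

theorem main_equiv (row : List Int) (maxColumns : Int) (align : String)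
    (hal : align = "left" ∨ align = "right" ∨ align = "center") :
    pad_row row maxColumns align = pad_row_alt row maxColumns align := by
  by_cases h : (row.length : Int) < maxColumns
  · rcases hal with h1 | h1 | h1 <;> subst h1
    · rw [pad_row]; simp [h]
      rw [main_equiv (row ++ [0]) maxColumns "left" (by simp)]
      exact alt_left_step row maxColumns h
    · rw [pad_row]; simp [h]
      rw [main_equiv (0 :: row) maxColumns "right" (by simp)]
      exact alt_right_step row maxColumns h
    · rw [pad_row]; simp [h]
      by_cases hp : (row.length : Int) % 2 = 1
      · simp [hp]
        rw [main_equiv (row ++ [0]) maxColumns "center" (by simp)]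
        exact alt_center_append row maxColumns h hp
      · have hp0 : (row.length : Int) % 2 = 0 := by omega
        simp [hp0]
        rw [main_equiv (0 :: row) maxColumns "center" (by simp)]
        exact alt_center_prepend row maxColumns h hp0
  · rw [pad_row]; simp [h]
    rw [alt_done row maxColumns align (by omega)]
termination_by (maxColumns - row.length).toNat
decreasing_by all_goals (simp_all; omega)

-- ===== VERDICT (by name: the statement is the Claim_ definition above) =====
theorem pad_row_spec : Claim_equal_pad_row := by
  intro row maxColumns align _ hpre
  unfold Spec_pad_row
  rcases hpre with h | h | h | h
  · exact main_equiv row maxColumns align (by tauto)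
  · exact main_equiv row maxColumns align (by tauto)
  · exact main_equiv row maxColumns align (by tauto)
  · rw [pad_row]; simp [show ¬ ((row.length : Int) < maxColumns) by omega]
    exact (alt_done row maxColumns align h).symm
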